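-- pv_equiv track=rewrite | github.com/Kamil116/Lessons-inf | 1/23/11270 (kege).py | f
-- ===== SOURCE A (Python) =====
-- def f(x, y):
--     if x == y:
--         return 1
--     if x == 32:
--         return 0
--     if x < y:
--         return 0
--     return f(x - 1, y) + f(x - 5, y)
-- ===== SOURCE B (Python) =====
-- def f(x, y):
--     # Bottom-up DP with a rolling window of the last five path counts.
--     if x < y:
--         return 0
--     w = [0, 0, 0, 0, 0]  # counts for t-5 .. t-1; anything below y counts 0
--     for t in range(y, x + 1):
--         g = 1 if t == y else (0 if t == 32 else w[4] + w[0])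
--         w = w[1:] + [g]
--     return w[4]
-- ===== Notes on version B (the rewrite author's own statement) =====
-- stated objective: alternative
-- what changed: B replaces A's binary recursion with a single bottom-up DP pass from y to x keeping a rolling window of the last five path counts.
import Mathlib
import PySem

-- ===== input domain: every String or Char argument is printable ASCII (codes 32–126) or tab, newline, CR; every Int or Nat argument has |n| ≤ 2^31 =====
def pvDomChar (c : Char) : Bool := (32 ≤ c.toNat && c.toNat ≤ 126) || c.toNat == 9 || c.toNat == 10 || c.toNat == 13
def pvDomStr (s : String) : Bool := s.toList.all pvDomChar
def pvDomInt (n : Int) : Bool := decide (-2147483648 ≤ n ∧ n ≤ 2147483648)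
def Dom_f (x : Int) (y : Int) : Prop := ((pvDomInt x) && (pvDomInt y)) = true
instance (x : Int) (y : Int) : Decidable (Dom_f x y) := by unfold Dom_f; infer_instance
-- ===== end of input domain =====

-- B replaces A's binary recursion by one bottom-up DP pass with a rolling window (objective: alternative).

-- ===== PORT A =====
def f (x : Int) (y : Int) : Int :=
  if x = y then 1
  else if x = 32 then 0
  else if x < y then 0
  else f (x - 1) y + f (x - 5) y
termination_by (x - y).toNat
decreasing_by all_goals omega

-- ===== PORT B =====
-- the loop 'for t in range(y, x+1)': n remaining iterations, current t, window w = counts for t-5..t-1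
def fAltLoop (n : Nat) (t : Int) (y : Int) (w : Int × Int × Int × Int × Int) :
    Int × Int × Int × Int × Int :=
  match n with
  | 0 => w
  | Nat.succ m =>
    let g : Int := if t = y then 1 else if t = 32 then 0 else w.2.2.2.2 + w.1
    fAltLoop m (t + 1) y (w.2.1, w.2.2.1, w.2.2.2.1, w.2.2.2.2, g)

def f_alt (x : Int) (y : Int) : Int :=
  if x < y then 0
  else (fAltLoop ((x - y).toNat + 1) y y (0, 0, 0, 0, 0)).2.2.2.2

-- ===== PRECONDITION & SPEC =====
-- A recurses with depth about x - y (each call recurses into x-1 first), so for x - y above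
-- Python's recursion limit (1000) it raises RecursionError; Pre_ keeps the depth safely under it.
-- A never returns a value outside Pre_ (for gaps above ~40 it does not finish either way).
def Pre_f (x : Int) (y : Int) : Prop := x - y ≤ 900
instance (x : Int) (y : Int) : Decidable (Pre_f x y) := by unfold Pre_f; infer_instance
def pvWitness_f : Int × Int := (12, 3)

def Spec_f (x : Int) (y : Int) (out : Int) : Prop := out = f_alt x y
instance (x : Int) (y : Int) (out : Int) : Decidable (Spec_f x y out) := by unfold Spec_f; infer_instance

-- ===== CLAIM (what is proved, stated in full; the proofs are below) =====
def Claim_equal_f : Prop := ∀ (x : Int) (y : Int), Dom_f x y → Pre_f x y → Spec_f x y (f x y)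

-- ===== LEMMAS AND PROOFS =====

-- below y, A returns 0 (either via the x == 32 branch or the x < y branch)
lemma f_lt (x y : Int) (h : x < y) : f x y = 0 := by
  rw [f]
  have hxy : ¬ x = y := by omega
  simp [hxy, h]

-- one step of the DP window computes A's value at t
lemma f_step (t y : Int) (ht : y ≤ t) :
    (if t = y then (1 : Int) else if t = 32 then 0 else f (t - 1) y + f (t - 5) y) = f t y := by
  conv_rhs => rw [f]
  have hlt : ¬ t < y := by omega
  simp [hlt]

-- loop invariant: running n steps from t with the true window gives the true window at t+n
lemma fAltLoop_inv (n : Nat) (t y : Int) (ht : y ≤ t) :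
    fAltLoop n t y (f (t - 5) y, f (t - 4) y, f (t - 3) y, f (t - 2) y, f (t - 1) y)
      = (f (t + n - 5) y, f (t + n - 4) y, f (t + n - 3) y, f (t + n - 2) y, f (t + n - 1) y) := by
  induction n generalizing t with
  | zero => simp [fAltLoop]
  | succ m ih =>
    rw [fAltLoop]
    simp only [f_step t y ht]
    have h1 := ih (t + 1) (by omega)
    rw [show (t + 1 - 5 : Int) = t - 4 by ring, show (t + 1 - 4 : Int) = t - 3 by ring,
        show (t + 1 - 3 : Int) = t - 2 by ring, show (t + 1 - 2 : Int) = t - 1 by ring,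
        show (t + 1 - 1 : Int) = t by ring] at h1
    rw [h1]
    push_cast
    ring_nf

theorem f_spec : Claim_equal_f := by
  intro x y _ _
  unfold Spec_f f_alt
  by_cases h : x < y
  · simp [h, f_lt x y h]
  · simp only [h, if_false]
    have hyx : y ≤ x := by omega
    have h0 : ∀ s : Int, s < y → f s y = 0 := fun s hs => f_lt s y hs
    have := fAltLoop_inv ((x - y).toNat + 1) y y le_rfl
    rw [h0 _ (by omega), h0 _ (by omega), h0 _ (by omega), h0 _ (by omega), h0 _ (by omega)] at this
    rw [this]
    have : y + (((x - y).toNat + 1 : Nat) : Int) - 1 = x := by omega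
    rw [this]
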